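-- pv_equiv track=rewrite | github.com/VoXc2/system-prompts-and-models-of-ai-tools | salesflow-saas/backend/app/intelligence/outreach.py | pick_angle
-- ===== SOURCE A (Python) =====
-- from typing import Dict, Any, Optional, List
--
-- SIGNAL_ANGLES = {
--     "hiring": {
--         "angle": "توسع الفريق",
--         "hook_ar": "لاحظنا أنكم تُوسّعون فريقكم — هذا المرحلة تحتاج منظومة مبيعات قوية",
--         "hook_en": "Noticed you're scaling your team — this is exactly when a strong sales OS matters",
--     },
--     "funding": {
--         "angle": "تمويل جديد",
--         "hook_ar": "تهانينا على جولة التمويل — الشركات بعد التمويل تبني محرك إيرادات سريع",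
--         "hook_en": "Congrats on the funding — post-investment is when you need to build your revenue engine fast",
--     },
--     "expansion": {
--         "angle": "توسع جغرافي",
--         "hook_ar": "رأينا توسعكم في السوق — دعونا نساعدكم تُحوّل هذا التوسع لعقود حقيقية",
--         "hook_en": "Saw your expansion news — let us help you convert that market entry into real contracts",
--     },
--     "digital_transformation": {
--         "angle": "تحول رقمي",
--         "hook_ar": "مبادرات التحول الرقمي تحتاج محرك مبيعات ذكي يواكبها",
--         "hook_en": "Digital transformation initiatives need an intelligent sales engine to match",
--     },
--     "ipo": {
--         "angle": "استعداد للطرح العام",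
--         "hook_ar": "الاستعداد للطرح العام يتطلب منظومة إيرادات موثوقة وقابلة للتدقيق",
--         "hook_en": "IPO readiness demands a verifiable and auditable revenue system",
--     },
--     "pain_point_crm": {
--         "angle": "إدارة علاقات العملاء",
--         "hook_ar": "إدارة العملاء بالإكسل في 2026 تُكلّف الشركة عقوداً ضائعة",
--         "hook_en": "Managing clients in spreadsheets in 2026 costs you real contracts",
--     },
--     "pain_point_outreach": {
--         "angle": "التواصل مع العملاء",
--         "hook_ar": "فرق المبيعات اليوم تحتاج أدوات ذكية تُولّد ليدز وتُغلق صفقات تلقائياً",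
--         "hook_en": "Sales teams today need AI tools that generate leads and close deals automatically",
--     },
-- }
--
-- def pick_angle(signals: List[str]) -> Dict:
--     """Pick the best outreach angle based on available signals"""
--     priority_order = ["funding", "ipo", "expansion", "hiring", "digital_transformation",
--                       "pain_point_crm", "pain_point_outreach"]
--     for sig in priority_order:
--         if sig in signals:
--             return SIGNAL_ANGLES[sig]
--     return {
--         "angle": "تطوير الأعمال",
--         "hook_ar": "نساعد الشركات الرائدة في السعودية على بناء محرك إيرادات ذكي",
--         "hook_en": "We help leading Saudi companies build an intelligent revenue engine",
--     }
-- ===== SOURCE B (Python) =====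
-- from typing import Dict, List
-- from collections import namedtuple
--
-- Row = namedtuple("Row", ["key", "angle", "hook_ar", "hook_en"])
--
-- # Rows in priority order: a row's position IS its priority rank.
-- ANGLE_ROWS = [
--     Row("funding",
--         "تمويل جديد",
--         "تهانينا على جولة التمويل — الشركات بعد التمويل تبني محرك إيرادات سريع",
--         "Congrats on the funding — post-investment is when you need to build your revenue engine fast"),
--     Row("ipo",
--         "استعداد للطرح العام",
--         "الاستعداد للطرح العام يتطلب منظومة إيرادات موثوقة وقابلة للتدقيق",
--         "IPO readiness demands a verifiable and auditable revenue system"),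
--     Row("expansion",
--         "توسع جغرافي",
--         "رأينا توسعكم في السوق — دعونا نساعدكم تُحوّل هذا التوسع لعقود حقيقية",
--         "Saw your expansion news — let us help you convert that market entry into real contracts"),
--     Row("hiring",
--         "توسع الفريق",
--         "لاحظنا أنكم تُوسّعون فريقكم — هذا المرحلة تحتاج منظومة مبيعات قوية",
--         "Noticed you're scaling your team — this is exactly when a strong sales OS matters"),
--     Row("digital_transformation",
--         "تحول رقمي",
--         "مبادرات التحول الرقمي تحتاج محرك مبيعات ذكي يواكبها",
--         "Digital transformation initiatives need an intelligent sales engine to match"),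
--     Row("pain_point_crm",
--         "إدارة علاقات العملاء",
--         "إدارة العملاء بالإكسل في 2026 تُكلّف الشركة عقوداً ضائعة",
--         "Managing clients in spreadsheets in 2026 costs you real contracts"),
--     Row("pain_point_outreach",
--         "التواصل مع العملاء",
--         "فرق المبيعات اليوم تحتاج أدوات ذكية تُولّد ليدز وتُغلق صفقات تلقائياً",
--         "Sales teams today need AI tools that generate leads and close deals automatically"),
-- ]
--
-- FALLBACK = Row("",
--     "تطوير الأعمال",
--     "نساعد الشركات الرائدة في السعودية على بناء محرك إيرادات ذكي",
--     "We help leading Saudi companies build an intelligent revenue engine")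
--
-- def _rank_of(sig):
--     """Position of sig's row in ANGLE_ROWS, or None if unknown."""
--     for i, row in enumerate(ANGLE_ROWS):
--         if row.key == sig:
--             return i
--     return None
--
-- def pick_angle(signals: List[str]) -> Dict:
--     """Single pass over signals keeping the smallest priority rank seen."""
--     best = None
--     for sig in signals:
--         r = _rank_of(sig)
--         if r is not None:
--             best = r if best is None or r < best else best
--     row = ANGLE_ROWS[best] if best is not None else FALLBACK
--     return {"angle": row.angle, "hook_ar": row.hook_ar, "hook_en": row.hook_en}
-- ===== Notes on version B (the rewrite author's own statement) =====
-- stated objective: alternative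
-- what changed: Instead of short-circuiting over the fixed priority list with a membership scan of signals per priority key, B stores the table as a priority-ordered list of row records (rank = position), makes a single pass over the input signals keeping the minimum rank seen, and renders that row (or the fallback row) into the result dict.
import Mathlib
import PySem

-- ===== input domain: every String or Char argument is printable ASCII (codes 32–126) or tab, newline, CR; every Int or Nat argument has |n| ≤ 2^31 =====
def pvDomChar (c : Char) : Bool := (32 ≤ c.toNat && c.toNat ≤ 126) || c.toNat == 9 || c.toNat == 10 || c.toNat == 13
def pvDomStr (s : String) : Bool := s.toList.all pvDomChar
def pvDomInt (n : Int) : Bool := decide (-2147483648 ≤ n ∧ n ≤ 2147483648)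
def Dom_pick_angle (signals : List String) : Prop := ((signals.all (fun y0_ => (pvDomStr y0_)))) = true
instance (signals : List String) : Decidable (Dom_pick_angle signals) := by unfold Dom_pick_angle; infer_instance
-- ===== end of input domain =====

-- B replaces A's short-circuit scan over the fixed priority list (membership test in
-- `signals` per priority key) by a single pass over `signals` keeping the minimum
-- priority rank seen, with the table stored as a priority-ordered list of row records
-- (rank = position); objective: alternative decomposition.

-- ===== PORT A =====
-- module constant SIGNAL_ANGLES, as A's code reads it (insertion order of the source dict)
def signalAngles : PySem.Dict String (List (String × String)) := PySem.Dict.ofList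
  [ ("hiring",
      [("angle", "توسع الفريق"),
       ("hook_ar", "لاحظنا أنكم تُوسّعون فريقكم — هذا المرحلة تحتاج منظومة مبيعات قوية"),
       ("hook_en", "Noticed you're scaling your team — this is exactly when a strong sales OS matters")]),
    ("funding",
      [("angle", "تمويل جديد"),
       ("hook_ar", "تهانينا على جولة التمويل — الشركات بعد التمويل تبني محرك إيرادات سريع"),
       ("hook_en", "Congrats on the funding — post-investment is when you need to build your revenue engine fast")]),
    ("expansion",
      [("angle", "توسع جغرافي"),
       ("hook_ar", "رأينا توسعكم في السوق — دعونا نساعدكم تُحوّل هذا التوسع لعقود حقيقية"),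
       ("hook_en", "Saw your expansion news — let us help you convert that market entry into real contracts")]),
    ("digital_transformation",
      [("angle", "تحول رقمي"),
       ("hook_ar", "مبادرات التحول الرقمي تحتاج محرك مبيعات ذكي يواكبها"),
       ("hook_en", "Digital transformation initiatives need an intelligent sales engine to match")]),
    ("ipo",
      [("angle", "استعداد للطرح العام"),
       ("hook_ar", "الاستعداد للطرح العام يتطلب منظومة إيرادات موثوقة وقابلة للتدقيق"),
       ("hook_en", "IPO readiness demands a verifiable and auditable revenue system")]),
    ("pain_point_crm",
      [("angle", "إدارة علاقات العملاء"),
       ("hook_ar", "إدارة العملاء بالإكسل في 2026 تُكلّف الشركة عقوداً ضائعة"),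
       ("hook_en", "Managing clients in spreadsheets in 2026 costs you real contracts")]),
    ("pain_point_outreach",
      [("angle", "التواصل مع العملاء"),
       ("hook_ar", "فرق المبيعات اليوم تحتاج أدوات ذكية تُولّد ليدز وتُغلق صفقات تلقائياً"),
       ("hook_en", "Sales teams today need AI tools that generate leads and close deals automatically")]) ]

-- A's default dict literal (returned after the loop falls through)
def defaultAngle : List (String × String) :=
  [("angle", "تطوير الأعمال"),
   ("hook_ar", "نساعد الشركات الرائدة في السعودية على بناء محرك إيرادات ذكي"),
   ("hook_en", "We help leading Saudi companies build an intelligent revenue engine")]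

-- A's for-loop over priority_order with early return
def pickLoop (signals : List String) : List String → List (String × String)
  | [] => defaultAngle
  | sig :: rest =>
      if signals.contains sig then (signalAngles.get? sig).getD []   -- key always present; getD [] unreachable
      else pickLoop signals rest

def pick_angle (signals : List String) : List (String × String) :=
  pickLoop signals ["funding", "ipo", "expansion", "hiring", "digital_transformation",
                    "pain_point_crm", "pain_point_outreach"]

-- ===== PORT B =====
-- Source B's Row namedtuple
structure AngleRow where
  sigKey : String
  angleTxt : String
  hookArabic : String
  hookEnglish : String
  deriving DecidableEq, Repr

-- Source B's ANGLE_ROWS: rows in priority order, a row's position IS its rank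
def angleRows : List AngleRow :=
  [ ⟨"funding",
     "تمويل جديد",
     "تهانينا على جولة التمويل — الشركات بعد التمويل تبني محرك إيرادات سريع",
     "Congrats on the funding — post-investment is when you need to build your revenue engine fast"⟩,
    ⟨"ipo",
     "استعداد للطرح العام",
     "الاستعداد للطرح العام يتطلب منظومة إيرادات موثوقة وقابلة للتدقيق",
     "IPO readiness demands a verifiable and auditable revenue system"⟩,
    ⟨"expansion",
     "توسع جغرافي",
     "رأينا توسعكم في السوق — دعونا نساعدكم تُحوّل هذا التوسع لعقود حقيقية",
     "Saw your expansion news — let us help you convert that market entry into real contracts"⟩,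
    ⟨"hiring",
     "توسع الفريق",
     "لاحظنا أنكم تُوسّعون فريقكم — هذا المرحلة تحتاج منظومة مبيعات قوية",
     "Noticed you're scaling your team — this is exactly when a strong sales OS matters"⟩,
    ⟨"digital_transformation",
     "تحول رقمي",
     "مبادرات التحول الرقمي تحتاج محرك مبيعات ذكي يواكبها",
     "Digital transformation initiatives need an intelligent sales engine to match"⟩,
    ⟨"pain_point_crm",
     "إدارة علاقات العملاء",
     "إدارة العملاء بالإكسل في 2026 تُكلّف الشركة عقوداً ضائعة",
     "Managing clients in spreadsheets in 2026 costs you real contracts"⟩,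
    ⟨"pain_point_outreach",
     "التواصل مع العملاء",
     "فرق المبيعات اليوم تحتاج أدوات ذكية تُولّد ليدز وتُغلق صفقات تلقائياً",
     "Sales teams today need AI tools that generate leads and close deals automatically"⟩ ]

-- Source B's FALLBACK row
def fallbackRow : AngleRow :=
  ⟨"",
   "تطوير الأعمال",
   "نساعد الشركات الرائدة في السعودية على بناء محرك إيرادات ذكي",
   "We help leading Saudi companies build an intelligent revenue engine"⟩

-- Source B's _rank_of: enumerate scan for sig's row position
def rankScan (i : Nat) (s : String) : List AngleRow → Option Nat
  | [] => none
  | row :: rows => if row.sigKey == s then some i else rankScan (i + 1) s rows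

def rankOf (s : String) : Option Nat := rankScan 0 s angleRows

-- Source B's main loop: keep the smallest rank seen
def bestLoop (best : Option Nat) : List String → Option Nat
  | [] => best
  | sig :: rest =>
      match rankOf sig with
      | none => bestLoop best rest
      | some r =>
          match best with
          | none => bestLoop (some r) rest
          | some b => bestLoop (if r < b then some r else some b) rest

-- Source B's final dict construction from a row
def renderRow (row : AngleRow) : List (String × String) :=
  [("angle", row.angleTxt), ("hook_ar", row.hookArabic), ("hook_en", row.hookEnglish)]

def pick_angle_alt (signals : List String) : List (String × String) :=
  renderRow (match bestLoop none signals with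
             | none => fallbackRow
             | some b => (angleRows[b]?).getD fallbackRow)

-- ===== PRECONDITION & SPEC =====
def Spec_pick_angle (signals : List String) (out : List (String × String)) : Prop := out = pick_angle_alt signals
instance (signals : List String) (out : List (String × String)) : Decidable (Spec_pick_angle signals out) := by unfold Spec_pick_angle; infer_instance

-- ===== CLAIM =====
def Claim_equal_pick_angle : Prop := ∀ (signals : List String), Dom_pick_angle signals → Spec_pick_angle signals (pick_angle signals)

-- ===== LEMMAS AND PROOFS =====

-- the min-combining step of B's loop, after the rank lookup
def nmin (best : Option Nat) (r : Nat) : Option Nat :=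
  match best with
  | none => some r
  | some b => if r < b then some r else some b

-- the ranks of the known signals, in input order
def ranks (signals : List String) : List Nat :=
  signals.filterMap rankOf

theorem bestLoop_eq (signals : List String) :
    ∀ acc, bestLoop acc signals = (ranks signals).foldl nmin acc := by
  induction signals with
  | nil => intro acc; rfl
  | cons s t ih =>
      intro acc
      cases h : rankOf s
      · simp [ranks, h, bestLoop, ih]
      · cases acc <;> simp [ranks, h, bestLoop, nmin, ih]

theorem nmin_some (b r : Nat) : nmin (some b) r = some (min b r) := by
  simp only [nmin]
  split_ifs with h <;> (congr 1; omega)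

theorem foldl_nmin_some (l : List Nat) : ∀ b, l.foldl nmin (some b) = some (l.foldl min b) := by
  induction l with
  | nil => intro b; rfl
  | cons a t ih => intro b; simp [List.foldl_cons, nmin_some, ih]

theorem foldl_min_le (l : List Nat) : ∀ b, l.foldl min b ≤ b ∧ ∀ x ∈ l, l.foldl min b ≤ x := by
  induction l with
  | nil => intro b; simp
  | cons a t ih =>
      intro b
      obtain ⟨h1, h2⟩ := ih (min b a)
      refine ⟨le_trans h1 (Nat.min_le_left _ _), ?_⟩
      intro x hx
      rcases List.mem_cons.mp hx with rfl | hx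
      · exact le_trans h1 (Nat.min_le_right _ _)
      · exact h2 x hx

theorem foldl_min_mem (l : List Nat) : ∀ b, l.foldl min b = b ∨ l.foldl min b ∈ l := by
  induction l with
  | nil => intro b; simp
  | cons a t ih =>
      intro b
      simp only [List.foldl_cons]
      rcases ih (min b a) with h | h
      · rw [h]
        rcases Nat.le_total b a with hba | hab
        · left; exact Nat.min_eq_left hba
        · right; rw [Nat.min_eq_right hab]; exact List.mem_cons_self
      · right; exact List.mem_cons_of_mem _ h

theorem fold_eq_min (l : List Nat) (k : Nat) (hmem : k ∈ l) (hle : ∀ x ∈ l, k ≤ x) :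
    l.foldl nmin none = some k := by
  cases l with
  | nil => cases hmem
  | cons a t =>
      have : (a :: t).foldl nmin none = some (t.foldl min a) := by
        simp [List.foldl_cons, nmin, foldl_nmin_some]
      rw [this]
      congr 1
      obtain ⟨h1, h2⟩ := foldl_min_le t a
      apply Nat.le_antisymm
      · rcases List.mem_cons.mp hmem with rfl | hk
        · exact h1
        · exact h2 k hk
      · rcases foldl_min_mem t a with h | h
        · rw [h]; exact hle a List.mem_cons_self
        · exact hle _ (List.mem_cons_of_mem _ h)

set_option maxRecDepth 8000 in
theorem rank_cases {s : String} {k : Nat} (h : rankOf s = some k) :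
    (s = "funding" ∧ k = 0) ∨ (s = "ipo" ∧ k = 1) ∨ (s = "expansion" ∧ k = 2) ∨
    (s = "hiring" ∧ k = 3) ∨ (s = "digital_transformation" ∧ k = 4) ∨
    (s = "pain_point_crm" ∧ k = 5) ∨ (s = "pain_point_outreach" ∧ k = 6) := by
  simp only [rankOf, angleRows, rankScan] at h
  split_ifs at h with h1 h2 h3 h4 h5 h6 h7
  · exact Or.inl ⟨(eq_of_beq h1).symm, (Option.some.inj h).symm⟩
  · exact Or.inr (Or.inl ⟨(eq_of_beq h2).symm, (Option.some.inj h).symm⟩)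
  · exact Or.inr (Or.inr (Or.inl ⟨(eq_of_beq h3).symm, (Option.some.inj h).symm⟩))
  · exact Or.inr (Or.inr (Or.inr (Or.inl ⟨(eq_of_beq h4).symm, (Option.some.inj h).symm⟩)))
  · exact Or.inr (Or.inr (Or.inr (Or.inr (Or.inl ⟨(eq_of_beq h5).symm, (Option.some.inj h).symm⟩))))
  · exact Or.inr (Or.inr (Or.inr (Or.inr (Or.inr (Or.inl ⟨(eq_of_beq h6).symm, (Option.some.inj h).symm⟩)))))
  · exact Or.inr (Or.inr (Or.inr (Or.inr (Or.inr (Or.inr ⟨(eq_of_beq h7).symm, (Option.some.inj h).symm⟩)))))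

theorem mem_ranks_of_mem {s : String} {k : Nat} {signals : List String}
    (hs : s ∈ signals) (hr : rankOf s = some k) : k ∈ ranks signals :=
  List.mem_filterMap.mpr ⟨s, hs, hr⟩

set_option maxRecDepth 20000 in
theorem pick_angle_spec_aux (signals : List String) :
    pick_angle signals = pick_angle_alt signals := by
  unfold pick_angle_alt
  rw [bestLoop_eq]
  by_cases h0 : "funding" ∈ signals
  · rw [fold_eq_min (ranks signals) 0 (mem_ranks_of_mem h0 (by decide)) (fun x _ => Nat.zero_le x)]
    simp [pick_angle, pickLoop, h0]; decide
  · by_cases h1 : "ipo" ∈ signals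
    · rw [fold_eq_min (ranks signals) 1 (mem_ranks_of_mem h1 (by decide)) ?_]
      · simp [pick_angle, pickLoop, h0, h1]; decide
      · intro x hx
        obtain ⟨s, hs, hg⟩ := List.mem_filterMap.mp hx
        rcases rank_cases hg with ⟨rfl, rfl⟩|⟨rfl, rfl⟩|⟨rfl, rfl⟩|⟨rfl, rfl⟩|⟨rfl, rfl⟩|⟨rfl, rfl⟩|⟨rfl, rfl⟩ <;>
          first | omega | exact absurd hs h0
    · by_cases h2 : "expansion" ∈ signals
      · rw [fold_eq_min (ranks signals) 2 (mem_ranks_of_mem h2 (by decide)) ?_]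
        · simp [pick_angle, pickLoop, h0, h1, h2]; decide
        · intro x hx
          obtain ⟨s, hs, hg⟩ := List.mem_filterMap.mp hx
          rcases rank_cases hg with ⟨rfl, rfl⟩|⟨rfl, rfl⟩|⟨rfl, rfl⟩|⟨rfl, rfl⟩|⟨rfl, rfl⟩|⟨rfl, rfl⟩|⟨rfl, rfl⟩ <;>
            first | omega | exact absurd hs h0 | exact absurd hs h1
      · by_cases h3 : "hiring" ∈ signals
        · rw [fold_eq_min (ranks signals) 3 (mem_ranks_of_mem h3 (by decide)) ?_]
          · simp [pick_angle, pickLoop, h0, h1, h2, h3]; decide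
          · intro x hx
            obtain ⟨s, hs, hg⟩ := List.mem_filterMap.mp hx
            rcases rank_cases hg with ⟨rfl, rfl⟩|⟨rfl, rfl⟩|⟨rfl, rfl⟩|⟨rfl, rfl⟩|⟨rfl, rfl⟩|⟨rfl, rfl⟩|⟨rfl, rfl⟩ <;>
              first | omega | exact absurd hs h0 | exact absurd hs h1 | exact absurd hs h2
        · by_cases h4 : "digital_transformation" ∈ signals
          · rw [fold_eq_min (ranks signals) 4 (mem_ranks_of_mem h4 (by decide)) ?_]
            · simp [pick_angle, pickLoop, h0, h1, h2, h3, h4]; decide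
            · intro x hx
              obtain ⟨s, hs, hg⟩ := List.mem_filterMap.mp hx
              rcases rank_cases hg with ⟨rfl, rfl⟩|⟨rfl, rfl⟩|⟨rfl, rfl⟩|⟨rfl, rfl⟩|⟨rfl, rfl⟩|⟨rfl, rfl⟩|⟨rfl, rfl⟩ <;>
                first | omega | exact absurd hs h0 | exact absurd hs h1 | exact absurd hs h2 | exact absurd hs h3
          · by_cases h5 : "pain_point_crm" ∈ signals
            · rw [fold_eq_min (ranks signals) 5 (mem_ranks_of_mem h5 (by decide)) ?_]
              · simp [pick_angle, pickLoop, h0, h1, h2, h3, h4, h5]; decide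
              · intro x hx
                obtain ⟨s, hs, hg⟩ := List.mem_filterMap.mp hx
                rcases rank_cases hg with ⟨rfl, rfl⟩|⟨rfl, rfl⟩|⟨rfl, rfl⟩|⟨rfl, rfl⟩|⟨rfl, rfl⟩|⟨rfl, rfl⟩|⟨rfl, rfl⟩ <;>
                  first | omega | exact absurd hs h0 | exact absurd hs h1 | exact absurd hs h2 | exact absurd hs h3 | exact absurd hs h4
            · by_cases h6 : "pain_point_outreach" ∈ signals
              · rw [fold_eq_min (ranks signals) 6 (mem_ranks_of_mem h6 (by decide)) ?_]
                · simp [pick_angle, pickLoop, h0, h1, h2, h3, h4, h5, h6]; decide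
                · intro x hx
                  obtain ⟨s, hs, hg⟩ := List.mem_filterMap.mp hx
                  rcases rank_cases hg with ⟨rfl, rfl⟩|⟨rfl, rfl⟩|⟨rfl, rfl⟩|⟨rfl, rfl⟩|⟨rfl, rfl⟩|⟨rfl, rfl⟩|⟨rfl, rfl⟩ <;>
                    first | omega | exact absurd hs h0 | exact absurd hs h1 | exact absurd hs h2 | exact absurd hs h3 | exact absurd hs h4 | exact absurd hs h5
              · have hnil : ranks signals = [] := by
                  rw [List.eq_nil_iff_forall_not_mem]
                  intro x hx
                  obtain ⟨s, hs, hg⟩ := List.mem_filterMap.mp hx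
                  rcases rank_cases hg with ⟨rfl, _⟩|⟨rfl, _⟩|⟨rfl, _⟩|⟨rfl, _⟩|⟨rfl, _⟩|⟨rfl, _⟩|⟨rfl, _⟩ <;>
                    first | exact h0 hs | exact h1 hs | exact h2 hs | exact h3 hs | exact h4 hs | exact h5 hs | exact h6 hs
                rw [hnil]
                simp [pick_angle, pickLoop, h0, h1, h2, h3, h4, h5, h6, List.foldl_nil]
                decide

-- ===== VERDICT =====
theorem pick_angle_spec : Claim_equal_pick_angle := by
  intro signals _
  exact pick_angle_spec_aux signals
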